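-- pv_equiv track=rewrite | github.com/digidem/earth-defenders-assistant | apps/ai_api/eda_ai_api/utils/vector_memory.py | _get_user_collection_names
-- ===== SOURCE A (Python) =====
-- from typing import Dict, List, Optional, Tuple, Any
--
-- def _get_user_collection_names(
--     session_id: str, platform: str = "whatsapp"
-- ) -> Tuple[str, str]:
--     """Generate user-specific collection names"""
--     # Create a consistent user identifier
--     user_id = (
--         f"{platform}_{session_id}".replace("-", "_")
--         .replace("@", "_at_")
--         .replace(".", "_dot_")
--     )
--     # Ensure collection names are valid (alphanumeric + underscore)
--     user_id = "".join(
--         c if c.isalnum() or c == "_" else "_" for c in user_id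
--     )
--
--     conversation_collection_name = f"conv_{user_id}"
--     document_collection_name = f"docs_{user_id}"
--
--     return conversation_collection_name, document_collection_name
-- ===== SOURCE B (Python) =====
-- def _map_char(c: str) -> str:
--     if c == "-":
--         return "_"
--     if c == "@":
--         return "_at_"
--     if c == ".":
--         return "_dot_"
--     if c.isalnum() or c == "_":
--         return c
--     return "_"
--
--
-- def _get_user_collection_names(session_id: str, platform: str = "whatsapp"):
--     user_id = "".join(_map_char(c) for c in f"{platform}_{session_id}")
--     return f"conv_{user_id}", f"docs_{user_id}"
-- ===== Notes on version B (the rewrite author's own statement) =====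
-- stated objective: simpler
-- what changed: Replaces the three chained substring .replace() passes plus a separate sanitising filter pass with one scan over the combined string that maps each character directly to its replacement.
import Mathlib
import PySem

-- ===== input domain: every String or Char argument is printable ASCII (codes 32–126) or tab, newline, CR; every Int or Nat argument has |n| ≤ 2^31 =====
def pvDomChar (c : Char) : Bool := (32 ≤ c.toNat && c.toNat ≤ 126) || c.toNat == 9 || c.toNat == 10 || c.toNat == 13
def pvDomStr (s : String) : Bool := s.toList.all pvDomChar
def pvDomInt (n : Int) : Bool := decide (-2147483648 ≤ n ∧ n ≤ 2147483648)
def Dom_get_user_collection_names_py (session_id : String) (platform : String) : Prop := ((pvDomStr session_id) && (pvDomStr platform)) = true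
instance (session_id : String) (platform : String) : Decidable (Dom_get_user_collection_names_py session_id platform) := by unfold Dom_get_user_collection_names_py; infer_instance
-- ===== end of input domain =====

-- B replaces A's three chained .replace() passes plus a filtering pass with one
-- per-character scan over the combined string (objective: simpler, one pass).


-- ===== PORT A =====
-- f"{platform}_{session_id}" then three .replace passes, then the filtering join.
def get_user_collection_names_py (session_id : String) (platform : String) : String × String :=
  let base : List Char := platform.toList ++ '_' :: session_id.toList
  let u1 := PySem.Chars.replace base ['-'] ['_']
  let u2 := PySem.Chars.replace u1 ['@'] ['_', 'a', 't', '_']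
  let u3 := PySem.Chars.replace u2 ['.'] ['_', 'd', 'o', 't', '_']
  -- "".join(c if c.isalnum() or c == "_" else "_" for c in user_id)
  let user_id := u3.map (fun c => if PySem.Chars.isalnum c || c = '_' then c else '_')
  (String.ofList ('c' :: 'o' :: 'n' :: 'v' :: '_' :: user_id),
   String.ofList ('d' :: 'o' :: 'c' :: 's' :: '_' :: user_id))

-- ===== PORT B =====
-- per-character replacement, Source B's _map_char
def pvMapChar (c : Char) : List Char :=
  if c = '-' then ['_']
  else if c = '@' then ['_', 'a', 't', '_']
  else if c = '.' then ['_', 'd', 'o', 't', '_']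
  else if PySem.Chars.isalnum c || c = '_' then [c]
  else ['_']

def get_user_collection_names_py_alt (session_id : String) (platform : String) : String × String :=
  let user_id := (platform.toList ++ '_' :: session_id.toList).flatMap pvMapChar
  (String.ofList ('c' :: 'o' :: 'n' :: 'v' :: '_' :: user_id),
   String.ofList ('d' :: 'o' :: 'c' :: 's' :: '_' :: user_id))

-- ===== PRECONDITION & SPEC =====
def Spec_get_user_collection_names_py (session_id : String) (platform : String) (out : String × String) : Prop := out = get_user_collection_names_py_alt session_id platform
instance (session_id : String) (platform : String) (out : String × String) : Decidable (Spec_get_user_collection_names_py session_id platform out) := by unfold Spec_get_user_collection_names_py; infer_instance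

-- ===== CLAIM (what is proved, stated in full; the proofs are below) =====
def Claim_equal_get_user_collection_names_py : Prop := ∀ (session_id : String) (platform : String), Dom_get_user_collection_names_py session_id platform → Spec_get_user_collection_names_py session_id platform (get_user_collection_names_py session_id platform)

-- ===== LEMMAS AND PROOFS =====

-- Chars.replace with a single-character pattern is a per-character flatMap.
theorem pv_go_single (o : Char) (new : List Char) :
    ∀ (l : List Char) (fuel : Nat) (acc : List Char), l.length ≤ fuel →
      PySem.Chars.replace.go [o] new fuel l acc
        = acc.reverse ++ l.flatMap (fun c => if c = o then new else [c]) := by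
  intro l
  induction l with
  | nil => intro fuel acc h; cases fuel <;> simp [PySem.Chars.replace.go]
  | cons c t ih =>
    intro fuel acc h
    cases fuel with
    | zero => simp at h
    | succ f =>
      rw [PySem.Chars.replace.go]
      by_cases hc : c = o
      · subst hc
        simp [List.isPrefixOf, ih f _ (by simpa using h)]
      · simp [List.isPrefixOf, Ne.symm hc, hc, ih f _ (by simpa using h)]

theorem pv_replace_single (s : List Char) (o : Char) (new : List Char) :
    PySem.Chars.replace s [o] new = s.flatMap (fun c => if c = o then new else [c]) := by
  simp [PySem.Chars.replace]
  simpa using pv_go_single o new s s.length [] le_rfl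

-- A's four passes collapse, character by character, to B's single mapping.
theorem pv_user_id_eq (base : List Char) :
    (PySem.Chars.replace
        (PySem.Chars.replace (PySem.Chars.replace base ['-'] ['_'])
          ['@'] ['_', 'a', 't', '_'])
        ['.'] ['_', 'd', 'o', 't', '_']).map
      (fun c => if PySem.Chars.isalnum c || c = '_' then c else '_')
    = base.flatMap pvMapChar := by
  induction base with
  | nil => decide
  | cons c t ih =>
    simp only [pv_replace_single, List.flatMap_cons, List.flatMap_append,
      List.map_append] at ih ⊢
    rw [ih]
    congr 1
    by_cases h1 : c = '-'
    · subst h1; decide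
    · by_cases h2 : c = '@'
      · subst h2; decide
      · by_cases h3 : c = '.'
        · subst h3; decide
        · simp only [h1, h2, h3, if_false, List.flatMap_cons, List.flatMap_nil,
            List.append_nil, List.map_cons, List.map_nil, pvMapChar]
          split_ifs <;> rfl

-- ===== VERDICT (by name: the statement is the Claim_ definition above) =====
theorem get_user_collection_names_py_spec : Claim_equal_get_user_collection_names_py := by
  intro session_id platform _
  unfold Spec_get_user_collection_names_py
  show (let base := platform.toList ++ '_' :: session_id.toList
    let u1 := PySem.Chars.replace base ['-'] ['_']
    let u2 := PySem.Chars.replace u1 ['@'] ['_', 'a', 't', '_']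
    let u3 := PySem.Chars.replace u2 ['.'] ['_', 'd', 'o', 't', '_']
    let user_id := u3.map (fun c => if PySem.Chars.isalnum c || c = '_' then c else '_')
    (String.ofList ('c' :: 'o' :: 'n' :: 'v' :: '_' :: user_id),
     String.ofList ('d' :: 'o' :: 'c' :: 's' :: '_' :: user_id))) = _
  simp only [pv_user_id_eq]
  rfl
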